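-- pv_equiv track=rewrite | github.com/Iram04hack/network-management-system | web-interface/django__backend/nms_backend/custom_swagger_generator.py | _create_organized_tags_list
-- ===== SOURCE A (Python) =====
-- def _create_organized_tags_list(used_tags):
--     """
--     Crée une liste organisée des tags avec descriptions.
--     """
--     # Ordre préféré des tags
--     tag_order = [
--         'AI Assistant',
--         'API Clients',
--         'API Views',
--         'Dashboard',
--         'GNS3 Integration',
--         'Monitoring',
--         'Network Management',
--         'Reporting',
--         'Security Management'
--     ]
--
--     # Descriptions des tags
--     tag_descriptions = {
--         'AI Assistant': 'Assistant intelligent et automation',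
--         'API Clients': 'Intégration avec services externes',
--         'API Views': 'Vues métier sophistiquées',
--         'Dashboard': 'Tableaux de bord et visualisation',
--         'GNS3 Integration': 'Interface complète avec GNS3',
--         'Monitoring': 'Surveillance et métriques avancées',
--         'Network Management': 'Gestion réseau et équipements',
--         'Reporting': 'Système de génération de rapports',
--         'Security Management': 'Système de sécurité avancé'
--     }
--
--     # Créer la liste organisée
--     organized_tags = []
--
--     # Ajouter les tags dans l'ordre préféré s'ils sont utilisés
--     for tag_name in tag_order:
--         if tag_name in used_tags:
--             organized_tags.append({
--                 'name': tag_name,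
--                 'description': tag_descriptions.get(tag_name, f'APIs pour {tag_name}')
--             })
--
--     # Ajouter les tags non prévus à la fin
--     for tag_name in sorted(used_tags):
--         if tag_name not in tag_order:
--             organized_tags.append({
--                 'name': tag_name,
--                 'description': f'APIs pour {tag_name}'
--             })
--
--     return organized_tags
-- ===== SOURCE B (Python) =====
-- def _create_organized_tags_list(used_tags):
--     """
--     Crée une liste organisée des tags avec descriptions.
--
--     Bucket version: one pass over the sorted tags distributes each tag into the
--     bucket of its preferred rank (last bucket = unplanned tags), replacing the
--     per-tag membership scans of the two-loop version.
--     """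
--     tag_order = [
--         'AI Assistant',
--         'API Clients',
--         'API Views',
--         'Dashboard',
--         'GNS3 Integration',
--         'Monitoring',
--         'Network Management',
--         'Reporting',
--         'Security Management'
--     ]
--
--     tag_descriptions = {
--         'AI Assistant': 'Assistant intelligent et automation',
--         'API Clients': 'Intégration avec services externes',
--         'API Views': 'Vues métier sophistiquées',
--         'Dashboard': 'Tableaux de bord et visualisation',
--         'GNS3 Integration': 'Interface complète avec GNS3',
--         'Monitoring': 'Surveillance et métriques avancées',
--         'Network Management': 'Gestion réseau et équipements',
--         'Reporting': 'Système de génération de rapports',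
--         'Security Management': 'Système de sécurité avancé'
--     }
--
--     n = len(tag_order)
--     order = {t: i for i, t in enumerate(tag_order)}
--
--     buckets = [[] for _ in range(n + 1)]
--     for t in sorted(used_tags):
--         buckets[order.get(t, n)].append(t)
--
--     result = []
--     for i, t in enumerate(tag_order):
--         if buckets[i]:
--             result.append({
--                 'name': t,
--                 'description': tag_descriptions.get(t, f'APIs pour {t}')
--             })
--     for t in buckets[n]:
--         result.append({
--             'name': t,
--             'description': f'APIs pour {t}'
--         })
--     return result
-- ===== Notes on version B (the rewrite author's own statement) =====
-- stated objective: alternative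
-- what changed: Replaces A's two order-specific loops (a membership scan of used_tags per preferred tag, then a membership scan of tag_order per sorted tag) with a rank dict and one bucket-distribution pass over sorted(used_tags), after which the result is read off the buckets.
import Mathlib
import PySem

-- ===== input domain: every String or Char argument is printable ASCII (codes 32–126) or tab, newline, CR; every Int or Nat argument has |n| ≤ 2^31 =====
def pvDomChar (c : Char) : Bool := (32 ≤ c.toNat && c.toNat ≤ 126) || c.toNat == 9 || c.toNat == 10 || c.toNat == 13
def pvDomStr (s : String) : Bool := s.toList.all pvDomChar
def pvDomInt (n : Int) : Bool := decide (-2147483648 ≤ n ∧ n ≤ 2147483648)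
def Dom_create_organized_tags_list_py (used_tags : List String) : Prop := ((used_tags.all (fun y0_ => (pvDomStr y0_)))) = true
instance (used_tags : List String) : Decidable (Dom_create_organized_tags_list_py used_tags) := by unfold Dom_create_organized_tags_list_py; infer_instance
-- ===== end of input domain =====

-- B replaces A's two membership-scanning loops by a rank dict and a single bucket-distribution
-- pass over the sorted tags (objective: alternative); the return values are proved identical.

-- literal constants of both Python sources (tag_order, tag_descriptions)
def pvTagOrder : List String :=
  ["AI Assistant", "API Clients", "API Views", "Dashboard", "GNS3 Integration",
   "Monitoring", "Network Management", "Reporting", "Security Management"]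

def pvTagDescriptions : PySem.Dict String String := PySem.Dict.ofList
  [("AI Assistant", "Assistant intelligent et automation"),
   ("API Clients", "Intégration avec services externes"),
   ("API Views", "Vues métier sophistiquées"),
   ("Dashboard", "Tableaux de bord et visualisation"),
   ("GNS3 Integration", "Interface complète avec GNS3"),
   ("Monitoring", "Surveillance et métriques avancées"),
   ("Network Management", "Gestion réseau et équipements"),
   ("Reporting", "Système de génération de rapports"),
   ("Security Management", "Système de sécurité avancé")]

-- ===== PORT A =====
def create_organized_tags_list_py (used_tags : List String) : List (List (String × String)) :=
  -- for tag_name in tag_order: if tag_name in used_tags: organized_tags.append({...})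
  let organized_tags : List (List (String × String)) :=
    pvTagOrder.foldl (fun acc tag_name =>
      if tag_name ∈ used_tags then
        acc ++ [[("name", tag_name),
                 ("description", pvTagDescriptions.getD tag_name ("APIs pour " ++ tag_name))]]
      else acc) []
  -- for tag_name in sorted(used_tags): if tag_name not in tag_order: organized_tags.append({...})
  (PySem.List.sorted used_tags (fun x => x) false).foldl (fun acc tag_name =>
    if tag_name ∉ pvTagOrder then
      acc ++ [[("name", tag_name), ("description", "APIs pour " ++ tag_name)]]
    else acc) organized_tags

-- ===== PORT B =====
-- order = {t: i for i, t in enumerate(tag_order)}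
def pvOrderIndex : PySem.Dict String Int :=
  (PySem.List.enumerate pvTagOrder).foldl (fun d p => d.insert p.2 p.1) PySem.Dict.empty

def create_organized_tags_list_py_alt (used_tags : List String) : List (List (String × String)) :=
  -- n = len(tag_order) = 9; buckets = [[] for _ in range(n + 1)]
  -- for t in sorted(used_tags): buckets[order.get(t, n)].append(t)
  -- (order.get(t, 9) lies in 0..9, so the index is nonnegative and in range: .toNat/set/getD are exact)
  let buckets : List (List String) :=
    (PySem.List.sorted used_tags (fun x => x) false).foldl (fun bs t =>
      let j := (pvOrderIndex.getD t 9).toNat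
      bs.set j (bs.getD j [] ++ [t])) (List.replicate 10 [])
  -- for i, t in enumerate(tag_order): if buckets[i]: result.append({...})
  let result : List (List (String × String)) :=
    (PySem.List.enumerate pvTagOrder).foldl (fun acc p =>
      if buckets.getD p.1.toNat [] ≠ [] then
        acc ++ [[("name", p.2),
                 ("description", pvTagDescriptions.getD p.2 ("APIs pour " ++ p.2))]]
      else acc) []
  -- for t in buckets[n]: result.append({...})
  (buckets.getD 9 []).foldl (fun acc t =>
    acc ++ [[("name", t), ("description", "APIs pour " ++ t)]]) result

-- ===== PRECONDITION & SPEC =====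
def Spec_create_organized_tags_list_py (used_tags : List String) (out : List (List (String × String))) : Prop := out = create_organized_tags_list_py_alt used_tags
instance (used_tags : List String) (out : List (List (String × String))) : Decidable (Spec_create_organized_tags_list_py used_tags out) := by unfold Spec_create_organized_tags_list_py; infer_instance

-- ===== CLAIM (what is proved, stated in full; the proofs are below) =====
def Claim_equal_create_organized_tags_list_py : Prop := ∀ (used_tags : List String), Dom_create_organized_tags_list_py used_tags → Spec_create_organized_tags_list_py used_tags (create_organized_tags_list_py used_tags)

-- ===== LEMMAS AND PROOFS =====

-- filtering and mapping the second components of an enumeration ignores the indices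
lemma pvEnum_filter_map {β : Type} (q : String → Prop) [DecidablePred q] (g : String → β)
    (xs : List String) (s : Int) :
    ((PySem.List.enumerate xs s).filter (fun p => decide (q p.2))).map (fun p => g p.2)
      = (xs.filter (fun t => decide (q t))).map g := by
  induction xs generalizing s with
  | nil => simp [PySem.List.enumerate_nil]
  | cons x xs ih =>
    rw [PySem.List.enumerate_cons]
    by_cases hq : q x <;> simp [hq, ih]

-- the rank function of B, characterised as a decision chain over the nine preferred tags
lemma pvIdx_spec (t : String) : pvOrderIndex.getD t 9 =
    if t = "Security Management" then 8 else if t = "Reporting" then 7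
    else if t = "Network Management" then 6 else if t = "Monitoring" then 5
    else if t = "GNS3 Integration" then 4 else if t = "Dashboard" then 3
    else if t = "API Views" then 2 else if t = "API Clients" then 1
    else if t = "AI Assistant" then 0 else 9 := by
  simp [pvOrderIndex, pvTagOrder, PySem.List.enumerate_cons, PySem.List.enumerate_nil,
    List.foldl, PySem.Dict.getD_insert, PySem.Dict.getD_empty]

set_option maxHeartbeats 2000000 in
lemma pvIdx_eq_iff (t : String) (k : Nat) (hk : k < 9) :
    ((pvOrderIndex.getD t 9).toNat = k) ↔ t = pvTagOrder.getD k "" := by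
  rw [pvIdx_spec t]; interval_cases k <;> split_ifs <;> simp_all [pvTagOrder]

lemma pvIdx_eq9_iff (t : String) :
    ((pvOrderIndex.getD t 9).toNat == 9) = decide (t ∉ pvTagOrder) := by
  rw [pvIdx_spec t]; split_ifs <;> simp_all [pvTagOrder]

-- bucket-fold invariant: bucket i collects exactly the tags of rank i, in order
lemma pvBucket_foldl (xs : List String) (bs : List (List String)) (hb : bs.length = 10)
    (i : Nat) (hi : i < 10) :
    (xs.foldl (fun bs t =>
        let j := (pvOrderIndex.getD t 9).toNat
        bs.set j (bs.getD j [] ++ [t])) bs).getD i []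
      = bs.getD i [] ++ xs.filter (fun t => (pvOrderIndex.getD t 9).toNat == i) := by
  induction xs generalizing bs with
  | nil => simp
  | cons x xs ih =>
    simp only [List.foldl_cons, List.filter_cons]
    rw [ih _ (by simp [hb])]
    by_cases hji : (pvOrderIndex.getD x 9).toNat = i
    · simp [List.getD, hji, hb, hi]
    · simp [List.getD, hji, hb, hi]

-- bucket k (k < 9) is nonempty exactly when the k-th preferred tag occurs
lemma pvBucketCond (S : List String) (k : Nat) (hk : k < 9) :
    (S.filter (fun t => (pvOrderIndex.getD t 9).toNat == k) ≠ []) ↔ pvTagOrder.getD k "" ∈ S := by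
  rw [Ne, List.filter_eq_nil_iff]
  push Not
  constructor
  · rintro ⟨t, htS, hpt⟩
    rw [beq_iff_eq, pvIdx_eq_iff t k hk] at hpt
    rwa [hpt] at htS
  · intro h
    exact ⟨_, h, by rw [beq_iff_eq, pvIdx_eq_iff _ k hk]⟩

-- both ports equal the same canonical filter/map expression
lemma pvPortA_eq (used_tags : List String) :
    create_organized_tags_list_py used_tags =
      (pvTagOrder.filter (fun t => decide (t ∈ used_tags))).map
        (fun t => [("name", t), ("description", pvTagDescriptions.getD t ("APIs pour " ++ t))])
      ++ ((PySem.List.sorted used_tags (fun x => x) false).filter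
            (fun t => decide (t ∉ pvTagOrder))).map
          (fun t => [("name", t), ("description", "APIs pour " ++ t)]) := by
  simp only [create_organized_tags_list_py]
  rw [PySem.List.foldl_append_ite (fun t => t ∈ used_tags),
      PySem.List.foldl_append_ite (fun t => t ∉ pvTagOrder)]
  simp

lemma pvPortB_eq (used_tags : List String) :
    create_organized_tags_list_py_alt used_tags =
      (pvTagOrder.filter (fun t => decide (t ∈ used_tags))).map
        (fun t => [("name", t), ("description", pvTagDescriptions.getD t ("APIs pour " ++ t))])
      ++ ((PySem.List.sorted used_tags (fun x => x) false).filter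
            (fun t => decide (t ∉ pvTagOrder))).map
          (fun t => [("name", t), ("description", "APIs pour " ++ t)]) := by
  simp only [create_organized_tags_list_py_alt]
  set S := PySem.List.sorted used_tags (fun x => x) false with hSdef
  set Bk := S.foldl (fun bs t =>
      let j := (pvOrderIndex.getD t 9).toNat
      bs.set j (bs.getD j [] ++ [t])) (List.replicate 10 ([] : List String)) with hBkdef
  have hbk : ∀ i : Nat, i < 10 →
      Bk.getD i [] = S.filter (fun t => (pvOrderIndex.getD t 9).toNat == i) := by
    intro i hi
    rw [hBkdef, pvBucket_foldl _ _ (by simp) i hi]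
    rw [List.getD_replicate, List.nil_append]
    exact hi
  have hmem : ∀ x, x ∈ S ↔ x ∈ used_tags := by
    intro x; rw [hSdef]; exact PySem.List.mem_sorted used_tags (fun y => y) false x
  have hcond : ∀ k : Nat, k < 9 → ((Bk.getD k [] ≠ []) ↔ pvTagOrder.getD k "" ∈ used_tags) := by
    intro k hk
    rw [hbk k (by omega), pvBucketCond S k hk, hmem]
  rw [hbk 9 (by norm_num)]
  rw [PySem.List.foldl_append_ite (fun p : Int × String => Bk.getD p.1.toNat [] ≠ [])]
  rw [PySem.List.foldl_append_singleton_eq_map, List.nil_append]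
  congr 1
  · rw [List.filter_congr (q := fun p : Int × String => decide (p.2 ∈ used_tags)) ?_,
        pvEnum_filter_map (fun t => t ∈ used_tags)
          (fun t => [("name", t), ("description", pvTagDescriptions.getD t ("APIs pour " ++ t))])]
    intro p hp
    simp only [pvTagOrder, PySem.List.enumerate_cons, PySem.List.enumerate_nil,
      List.mem_cons, List.not_mem_nil, or_false] at hp
    rcases hp with hp | hp | hp | hp | hp | hp | hp | hp | hp <;>
      (subst hp; apply decide_eq_decide.mpr)
    · simpa [pvTagOrder] using hcond 0 (by norm_num)
    · simpa [pvTagOrder] using hcond 1 (by norm_num)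
    · simpa [pvTagOrder] using hcond 2 (by norm_num)
    · simpa [pvTagOrder] using hcond 3 (by norm_num)
    · simpa [pvTagOrder] using hcond 4 (by norm_num)
    · simpa [pvTagOrder] using hcond 5 (by norm_num)
    · simpa [pvTagOrder] using hcond 6 (by norm_num)
    · simpa [pvTagOrder] using hcond 7 (by norm_num)
    · simpa [pvTagOrder] using hcond 8 (by norm_num)
  · exact congrArg _ (List.filter_congr (fun t _ => pvIdx_eq9_iff t))

-- ===== VERDICT (by name: the statement is the Claim_ definition above) =====
theorem create_organized_tags_list_py_spec : Claim_equal_create_organized_tags_list_py := by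
  intro used_tags _
  unfold Spec_create_organized_tags_list_py
  rw [pvPortA_eq, pvPortB_eq]
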